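-- pv_equiv track=rewrite | github.com/ytyi/Introduction-to-algorithm | knapsack.py | knapsack_big
-- ===== SOURCE A (Python) =====
-- def knapsack_big(total,L):
--     L.sort(reverse=True)
--     if total==0:
--         return 1,[]
--     if len(L)==1 and L[0]!=total:
--         return 0,[]
--     elif len(L)==1 and L[0]==total:
--         return 1,L
--     else:
--         num=L[0]
--         Lti=[]
--         Lres=[]
--         for i in range(0,len(L)):
--             Lti.append(L[i])
--         Lti.pop(0)
--         if num>total:
--             return 0,[]
--         else:
--             index,Lres=knapsack_big(total-num,Lti)
--             if index==0:
--                 return 0,[]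
--             else:
--                 Lres.insert(0,num)
--                 return 1,Lres
-- ===== SOURCE B (Python) =====
-- def knapsack_big(total, L):
--     # Single linear pass over the descending-sorted list instead of A's
--     # recursion that re-sorts and copies the remaining list at every level.
--     # Like A, this sorts L in place (same observable mutation).
--     L.sort(reverse=True)
--     rem = total
--     chosen = []
--     n = len(L)
--     for i, x in enumerate(L):
--         if rem == 0:
--             return 1, chosen
--         if i == n - 1:
--             return (1, chosen + [x]) if x == rem else (0, [])
--         if x > rem:
--             return 0, []
--         chosen.append(x)
--         rem -= x
--     return (1, chosen) if rem == 0 else (0, [])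
-- ===== Notes on version B (the rewrite author's own statement) =====
-- stated objective: alternative
-- what changed: Replaces A's recursion, which re-sorts the list and materialises a full copy of it at every level, with one descending sort followed by a single iterative pass that subtracts accepted items from the remaining total and accumulates the chosen list.
import Mathlib
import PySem

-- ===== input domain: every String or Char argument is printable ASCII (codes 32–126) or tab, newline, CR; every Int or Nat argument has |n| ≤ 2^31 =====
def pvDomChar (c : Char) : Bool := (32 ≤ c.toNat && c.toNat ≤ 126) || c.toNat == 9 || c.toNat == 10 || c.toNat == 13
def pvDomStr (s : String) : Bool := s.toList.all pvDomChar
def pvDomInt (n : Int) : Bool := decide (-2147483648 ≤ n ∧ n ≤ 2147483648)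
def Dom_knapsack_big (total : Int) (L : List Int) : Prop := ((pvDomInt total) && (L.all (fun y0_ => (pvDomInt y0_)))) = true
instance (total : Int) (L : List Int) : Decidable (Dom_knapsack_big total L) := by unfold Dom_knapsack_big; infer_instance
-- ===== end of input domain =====

-- B replaces A's copy-and-re-sort recursion by one descending sort plus a single
-- linear pass (alternative decomposition, not measured faster). Both Pythons sort L
-- in place; the equivalence proved is about the return value.

-- ===== PORT A =====
-- used by the port's termination proof: the 'for i in range(0,len(L)): Lti.append(L[i])' copy loop returns the list itself
theorem pvCopy_eq (xs : List Int) :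
    (PySem.List.pyRange 0 (xs.length : Int) 1).foldl (fun a i => a ++ [PySem.List.pyGetD xs i 0]) [] = xs := by
  rw [PySem.List.foldl_pyRange_zero_pyGetD' xs 0 (fun a x => a ++ [x]) []]
  exact PySem.List.foldl_append_singleton xs []

def knapsack_big (total : Int) (L : List Int) : Int × List Int :=
  let Ls := PySem.List.sorted L (fun v => v) true        -- L.sort(reverse=True)
  if total = 0 then (1, [])
  else if Ls.length = 1 ∧ PySem.List.pyGetD Ls 0 0 ≠ total then (0, [])
  else if Ls.length = 1 ∧ PySem.List.pyGetD Ls 0 0 = total then (1, Ls)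
  else
    match hnum : PySem.List.pyGet? Ls 0 with             -- num = L[0]; none = IndexError (excluded by Pre_)
    | none => (0, [])
    | some num =>
      -- Lti = copy of L via the for-loop, then Lti.pop(0)
      let Lti := (PySem.List.pyRange 0 (Ls.length : Int) 1).foldl (fun a i => a ++ [PySem.List.pyGetD Ls i 0]) []
      match hpop : PySem.List.pop? Lti 0 with
      | none => (0, [])                                  -- unreachable: Lti is nonempty here
      | some (_, rest) =>
        if num > total then (0, [])
        else
          let r := knapsack_big (total - num) rest
          if r.1 = 0 then (0, [])
          else (1, num :: r.2)                           -- Lres.insert(0,num)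
termination_by L.length
decreasing_by
  have h1 : rest.length + 1 = Lti.length := PySem.List.length_of_pop?_eq_some Lti hpop
  have h2 : Lti = Ls := pvCopy_eq Ls
  have h3 : Ls.length = L.length := PySem.List.length_sorted L (fun v => v) true
  have h4 : Lti.length = L.length := by rw [h2, h3]
  omega

-- ===== PORT B =====
-- the for-loop of Source B: rem & chosen are the loop state, the [x] case is the 'i == n-1' branch
def knapsackAltGo (rem : Int) (chosen : List Int) : List Int → Int × List Int
  | [] => if rem = 0 then (1, chosen) else (0, [])
  | [x] => if rem = 0 then (1, chosen)
           else if x = rem then (1, chosen ++ [x]) else (0, [])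
  | x :: y :: rest =>
      if rem = 0 then (1, chosen)
      else if x > rem then (0, [])
      else knapsackAltGo (rem - x) (chosen ++ [x]) (y :: rest)

def knapsack_big_alt (total : Int) (L : List Int) : Int × List Int :=
  knapsackAltGo total [] (PySem.List.sorted L (fun v => v) true)

-- ===== PRECONDITION & SPEC =====
-- Pre_ excludes exactly the inputs where Python A raises IndexError: empty list with total ≠ 0
def Pre_knapsack_big (total : Int) (L : List Int) : Prop := L ≠ [] ∨ total = 0
instance (total : Int) (L : List Int) : Decidable (Pre_knapsack_big total L) := by unfold Pre_knapsack_big; infer_instance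
def pvWitness_knapsack_big : Int × List Int := (7, [5, 2, 3])

def Spec_knapsack_big (total : Int) (L : List Int) (out : Int × List Int) : Prop := out = knapsack_big_alt total L
instance (total : Int) (L : List Int) (out : Int × List Int) : Decidable (Spec_knapsack_big total L out) := by unfold Spec_knapsack_big; infer_instance

-- ===== CLAIM (what is proved, stated in full; the proofs are below) =====
def Claim_equal_knapsack_big : Prop := ∀ (total : Int) (L : List Int), Dom_knapsack_big total L → Pre_knapsack_big total L → Spec_knapsack_big total L (knapsack_big total L)

-- ===== LEMMAS AND PROOFS =====

-- Main invariant: on an already-descending list, B's loop computes A's result with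
-- its accumulator prefixed to the chosen list, and A's flag is 0 or 1.
theorem knapsack_core (xs : List Int) (hs : xs.Pairwise (fun a b => b ≤ a)) :
    ∀ (t : Int) (acc : List Int),
      (knapsack_big t xs = (0, []) ∧ knapsackAltGo t acc xs = (0, [])) ∨
      (∃ l, knapsack_big t xs = (1, l) ∧ knapsackAltGo t acc xs = (1, acc ++ l)) := by
  induction xs with
  | nil =>
    intro t acc
    rw [knapsack_big]
    by_cases ht : t = 0 <;>
      simp [ht, knapsackAltGo, PySem.List.sorted, PySem.List.pyGet?, PySem.List.pyIdx?]
  | cons a tail ih =>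
    cases tail with
    | nil =>
      intro t acc
      rw [knapsack_big]
      have h1 : PySem.List.sorted [a] (fun v => v) true = [a] :=
        PySem.List.sorted_rev_eq_self_of_pairwise [a] (fun v => v) (by simp)
      simp only [h1]
      have hget : PySem.List.pyGetD [a] 0 0 = a := by
        simp [PySem.List.pyGetD, PySem.List.pyGet?, PySem.List.pyIdx?]
      by_cases ht : t = 0
      · simp [ht, knapsackAltGo]
      · by_cases ha : a = t
        · right; exact ⟨[a], by simp [hget, ht, ha, knapsackAltGo]⟩
        · left; simp [hget, ht, ha, knapsackAltGo]
    | cons b l =>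
      intro t acc
      have hs' : (b :: l).Pairwise (fun x y => y ≤ x) := hs.tail
      have h1 : PySem.List.sorted (a :: b :: l) (fun v => v) true = a :: b :: l :=
        PySem.List.sorted_rev_eq_self_of_pairwise _ (fun v => v) hs
      rw [knapsack_big]
      simp only [h1]
      by_cases ht : t = 0
      · right; exact ⟨[], by simp [ht, knapsackAltGo]⟩
      · have hlen : ¬((a :: b :: l).length = 1 ∧ PySem.List.pyGetD (a :: b :: l) 0 0 ≠ t) := by simp
        have hlen2 : ¬((a :: b :: l).length = 1 ∧ PySem.List.pyGetD (a :: b :: l) 0 0 = t) := by simp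
        have hge : (0:Int) ≤ (l.length:Int) + 1 := by positivity
        have hget : PySem.List.pyGet? (a :: b :: l) 0 = some a := by
          simp [PySem.List.pyGet?, PySem.List.pyIdx?, hge]
        have hcopy := pvCopy_eq (a :: b :: l)
        rw [if_neg ht, if_neg hlen, if_neg hlen2]
        split
        · next hnum =>
            rw [h1, hget] at hnum; exact absurd hnum (by simp)
        · next num hnum =>
            rw [h1, hget] at hnum
            have hna : a = num := by injection hnum
            subst hna
            split
            · next hpop =>
                rw [h1, hcopy, PySem.List.pop?_zero_cons] at hpop
                exact absurd hpop (by simp)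
            · next fst rest hpop =>
                rw [h1, hcopy, PySem.List.pop?_zero_cons] at hpop
                injection hpop with h
                injection h with hf hr
                subst hf; subst hr
                by_cases hat : t < a
                · left
                  exact ⟨by simp [hat], by simp [knapsackAltGo, ht, hat]⟩
                · rcases ih hs' (t - a) (acc ++ [a]) with ⟨hA, hB⟩ | ⟨l', hA, hB⟩
                  · left
                    refine ⟨by simp [hat, hA], ?_⟩
                    simp only [knapsackAltGo, if_neg ht]
                    rw [if_neg (by omega : ¬ a > t)]
                    exact hB
                  · right
                    refine ⟨a :: l', by simp [hat, hA], ?_⟩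
                    simp only [knapsackAltGo, if_neg ht]
                    rw [if_neg (by omega : ¬ a > t)]
                    rw [hB]; simp

theorem knapsack_resort (t : Int) (L : List Int) :
    knapsack_big t L = knapsack_big t (PySem.List.sorted L (fun v => v) true) := by
  conv_lhs => rw [knapsack_big]
  conv_rhs => rw [knapsack_big]
  rw [PySem.List.sorted_rev_sorted_rev]

theorem knapsack_final (total : Int) (L : List Int) :
    knapsack_big total L = knapsackAltGo total [] (PySem.List.sorted L (fun v => v) true) := by
  have hsp : (PySem.List.sorted L (fun v => v) true).Pairwise (fun a b => b ≤ a) := by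
    simpa using PySem.List.sorted_pairwise_rev L (fun v => v)
  rw [knapsack_resort total L]
  rcases knapsack_core _ hsp total [] with ⟨hA, hB⟩ | ⟨l', hA, hB⟩
  · rw [hA, hB]
  · rw [hA, hB]; simp

-- ===== VERDICT (by name: the statement is the Claim_ definition above) =====
theorem knapsack_big_spec : Claim_equal_knapsack_big := by
  intro total L _ _
  unfold Spec_knapsack_big knapsack_big_alt
  exact knapsack_final total L
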